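-- pv_equiv track=rewrite | github.com/UgaChavis/AutostopCRM-V1 | src/minimal_kanban/services/snapshot_service.py | _card_log_totals
-- ===== SOURCE A (Python) =====
-- from typing import Any
--
-- def _card_log_totals(entries: list[dict[str, Any]]) -> dict[str, object]:
--     return {
--         "count": len(entries),
--         "actors": len(
--             {str(item.get("actor_name") or "") for item in entries if item.get("actor_name")}
--         ),
--         "sources": len(
--             {str(item.get("source") or "") for item in entries if item.get("source")}
--         ),
--         "actions": len(
--             {str(item.get("action") or "") for item in entries if item.get("action")}
--         ),
--         "changes": sum(int(item.get("change_count") or 0) for item in entries),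
--         "deletions": sum(1 for item in entries if item.get("has_deletion")),
--     }
-- ===== SOURCE B (Python) =====
-- def _card_log_totals(entries):
--     actors = set()
--     sources = set()
--     actions = set()
--     changes = 0
--     deletions = 0
--     for item in entries:
--         v = item.get("actor_name")
--         if v:
--             actors.add(str(v))
--         v = item.get("source")
--         if v:
--             sources.add(str(v))
--         v = item.get("action")
--         if v:
--             actions.add(str(v))
--         changes += int(item.get("change_count") or 0)
--         if item.get("has_deletion"):
--             deletions += 1
--     return {
--         "count": len(entries),
--         "actors": len(actors),
--         "sources": len(sources),
--         "actions": len(actions),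
--         "changes": changes,
--         "deletions": deletions,
--     }
-- ===== Notes on version B (the rewrite author's own statement) =====
-- stated objective: alternative
-- what changed: Replaces six independent passes/comprehensions over entries with one loop maintaining three sets and two accumulators.
import Mathlib
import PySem

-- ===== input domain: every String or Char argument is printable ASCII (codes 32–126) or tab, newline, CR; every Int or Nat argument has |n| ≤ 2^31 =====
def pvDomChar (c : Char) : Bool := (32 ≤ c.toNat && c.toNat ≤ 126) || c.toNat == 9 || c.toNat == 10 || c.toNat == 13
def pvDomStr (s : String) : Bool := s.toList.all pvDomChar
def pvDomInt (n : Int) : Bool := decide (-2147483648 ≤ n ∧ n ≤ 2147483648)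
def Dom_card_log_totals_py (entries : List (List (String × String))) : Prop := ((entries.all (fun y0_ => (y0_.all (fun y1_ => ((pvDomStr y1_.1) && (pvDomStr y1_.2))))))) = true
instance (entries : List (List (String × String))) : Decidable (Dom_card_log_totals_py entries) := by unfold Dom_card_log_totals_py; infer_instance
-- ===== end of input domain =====

-- B fuses A's six independent passes (three set comprehensions, two generator sums, len)
-- into one loop over entries; equivalence is about the returned dict (no side effects).

-- item.get(k): first match in the association list, None if absent (shared lookup primitive)
def pvGet (item : List (String × String)) (k : String) : Option String :=
  (item.find? (fun p => p.1 == k)).map (·.2)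

-- truthy string value of item.get(k): 'item.get(k)' is truthy iff present and non-empty
def pvTruthyGet (item : List (String × String)) (k : String) : Option String :=
  match pvGet item k with
  | some v => if v ≠ "" then some v else none
  | none => none

-- int(item.get("change_count") or 0); total form (.getD 0) only under Pre_
def pvChangeVal (item : List (String × String)) : Int :=
  match pvTruthyGet item "change_count" with
  | some v => (PySem.Int.ofStr? v).getD 0
  | none => 0

-- ===== PORT A =====
def card_log_totals_py (entries : List (List (String × String))) : List (String × Int) :=
  [("count", (entries.length : Int)),
   ("actors", (PySem.Set.len (PySem.Set.ofList (entries.filterMap (fun item => pvTruthyGet item "actor_name"))) : Int)),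
   ("sources", (PySem.Set.len (PySem.Set.ofList (entries.filterMap (fun item => pvTruthyGet item "source"))) : Int)),
   ("actions", (PySem.Set.len (PySem.Set.ofList (entries.filterMap (fun item => pvTruthyGet item "action"))) : Int)),
   ("changes", (entries.map pvChangeVal).sum),
   ("deletions", ((entries.countP (fun item => (pvTruthyGet item "has_deletion").isSome)) : Int))]

-- ===== PORT B =====
-- one loop state: (actors, sources, actions, changes, deletions)
def pvStepB (st : PySem.Set String × PySem.Set String × PySem.Set String × Int × Int)
    (item : List (String × String)) :
    PySem.Set String × PySem.Set String × PySem.Set String × Int × Int :=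
  let (a, s, c, ch, d) := st
  let a := match pvTruthyGet item "actor_name" with
           | some v => PySem.Set.add a v
           | none => a
  let s := match pvTruthyGet item "source" with
           | some v => PySem.Set.add s v
           | none => s
  let c := match pvTruthyGet item "action" with
           | some v => PySem.Set.add c v
           | none => c
  let ch := ch + pvChangeVal item
  let d := if (pvTruthyGet item "has_deletion").isSome then d + 1 else d
  (a, s, c, ch, d)

def card_log_totals_py_alt (entries : List (List (String × String))) : List (String × Int) :=
  let (a, s, c, ch, d) := entries.foldl pvStepB (PySem.Set.empty, PySem.Set.empty, PySem.Set.empty, 0, 0)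
  [("count", (entries.length : Int)),
   ("actors", (PySem.Set.len a : Int)),
   ("sources", (PySem.Set.len s : Int)),
   ("actions", (PySem.Set.len c : Int)),
   ("changes", ch),
   ("deletions", d)]

-- ===== PRECONDITION & SPEC =====
-- A raises ValueError when a truthy "change_count" value does not parse as a Python int; exactly those inputs are excluded.
def Pre_card_log_totals_py (entries : List (List (String × String))) : Prop :=
  (entries.all (fun item =>
    match pvTruthyGet item "change_count" with
    | some v => (PySem.Int.ofStr? v).isSome
    | none => true)) = true
instance (entries : List (List (String × String))) : Decidable (Pre_card_log_totals_py entries) := by unfold Pre_card_log_totals_py; infer_instance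

def pvWitness_card_log_totals_py : (List (List (String × String))) :=
  [[("actor_name", "ann"), ("change_count", "2"), ("has_deletion", "y")],
   [("source", "web"), ("action", "move"), ("change_count", "")]]

def Spec_card_log_totals_py (entries : List (List (String × String))) (out : List (String × Int)) : Prop := out = card_log_totals_py_alt entries
instance (entries : List (List (String × String))) (out : List (String × Int)) : Decidable (Spec_card_log_totals_py entries out) := by unfold Spec_card_log_totals_py; infer_instance

-- ===== CLAIM (what is proved, stated in full; the proofs are below) =====
def Claim_equal_card_log_totals_py : Prop := ∀ (entries : List (List (String × String))), Dom_card_log_totals_py entries → Pre_card_log_totals_py entries → Spec_card_log_totals_py entries (card_log_totals_py entries)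

-- ===== LEMMAS AND PROOFS =====

lemma pvLoop_spec (entries : List (List (String × String)))
    (a s c : PySem.Set String) (ch d : Int) :
    entries.foldl pvStepB (a, s, c, ch, d) =
      (List.foldl PySem.Set.add a (entries.filterMap (fun item => pvTruthyGet item "actor_name")),
       List.foldl PySem.Set.add s (entries.filterMap (fun item => pvTruthyGet item "source")),
       List.foldl PySem.Set.add c (entries.filterMap (fun item => pvTruthyGet item "action")),
       ch + (entries.map pvChangeVal).sum,
       d + (entries.countP (fun item => (pvTruthyGet item "has_deletion").isSome) : Int)) := by
  induction entries generalizing a s c ch d with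
  | nil => simp
  | cons x xs ih =>
      simp only [List.foldl_cons, pvStepB, List.filterMap_cons, List.map_cons, List.sum_cons,
        List.countP_cons]
      rw [ih]
      cases h1 : pvTruthyGet x "actor_name" <;>
        cases h2 : pvTruthyGet x "source" <;>
          cases h3 : pvTruthyGet x "action" <;>
            cases h4 : (pvTruthyGet x "has_deletion").isSome <;>
              simp [h4, add_assoc, add_comm]

-- ===== VERDICT (by name: the statement is the Claim_ definition above) =====
theorem card_log_totals_py_spec : Claim_equal_card_log_totals_py := by
  intro entries _ _
  unfold Spec_card_log_totals_py card_log_totals_py card_log_totals_py_alt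
  rw [pvLoop_spec]
  simp [PySem.Set.ofList_eq_foldl, PySem.Set.len, PySem.Set.empty]
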